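-- pv_equiv track=rewrite | github.com/teddbug-S/Python-Practical-Projects | Just Practice/flames2.py | analyze_names
-- ===== SOURCE A (Python) =====
-- def replace(seq, new, pos=0, old=None):
--         if not pos and old:
--             pos = seq.index(old)
--         seq.pop(pos)
--         seq.insert(pos, new)
--
-- def analyze_names(name1, name2):
--     name1 = list(name1)
--     name2 = list(name2)
--     for letter in name1:
--         if letter in name2:
--             replace(seq=name2, new='', old=letter)
--             replace(seq=name1, new='', old=letter)
--     result = [letter for letter in [*name1, *name2] if letter]
--     return result
-- ===== SOURCE B (Python) =====
-- def analyze_names(name1, name2):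
--     # Single-pass counting version: remove, for each letter, min(count1, count2)
--     # leftmost occurrences from each name; keep the rest in order.
--     avail = {}
--     for ch in name2:
--         avail[ch] = avail.get(ch, 0) + 1
--     removed = {}
--     out = []
--     for ch in name1:
--         if avail.get(ch, 0) > 0:
--             avail[ch] -= 1
--             removed[ch] = removed.get(ch, 0) + 1
--         else:
--             out.append(ch)
--     for ch in name2:
--         if removed.get(ch, 0) > 0:
--             removed[ch] -= 1
--         else:
--             out.append(ch)
--     return out
-- ===== Notes on version B (the rewrite author's own statement) =====
-- stated objective: faster
-- what changed: Replaces A's quadratic loop (membership scan plus list.index/pop/insert rescans of both names for every letter) by two single counting passes: a dict of available letter counts of name2 decides removal of each name1 letter, and a dict of per-letter removal counts drops the leftmost removed occurrences of name2.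
import Mathlib
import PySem

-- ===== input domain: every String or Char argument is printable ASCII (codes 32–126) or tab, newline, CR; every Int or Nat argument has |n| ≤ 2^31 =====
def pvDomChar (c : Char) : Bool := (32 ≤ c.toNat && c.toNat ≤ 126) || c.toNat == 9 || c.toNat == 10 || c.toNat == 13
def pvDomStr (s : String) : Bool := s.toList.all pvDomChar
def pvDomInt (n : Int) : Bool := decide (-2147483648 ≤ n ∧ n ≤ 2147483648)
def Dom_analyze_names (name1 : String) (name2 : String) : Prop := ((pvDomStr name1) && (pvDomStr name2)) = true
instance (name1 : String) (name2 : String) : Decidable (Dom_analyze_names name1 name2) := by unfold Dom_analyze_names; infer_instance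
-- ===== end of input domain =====

-- B replaces A's quadratic blank-out-and-rescan loops by one counting pass per name (same return value; A mutates
-- only its local copies, so no observable side effects).

-- ===== PORT A =====
-- replace(seq, new, pos=0, old=letter): pos = seq.index(old) when pos is 0 and old is truthy;
-- pop(pos); insert(pos, new). Total rendering: A only calls it with old a nonempty letter
-- present in seq, where index?/pop? succeed, so the getD defaults are never taken.
def pyReplace (seq : List String) (new : String) (old : String) : List String :=
  let pos : Nat := if old ≠ "" then (PySem.List.index? seq old).getD 0 else 0
  let seq' := ((PySem.List.pop? seq (pos : Int)).map Prod.snd).getD seq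
  PySem.List.insert seq' (pos : Int) new

-- the 'for letter in name1' loop: Python iterates by index while name1 mutates; pop+insert keeps
-- the length constant, so fuel = the initial length together with the i < length guard is exact.
def aLoop (fuel : Nat) (i : Nat) (n1 n2 : List String) : List String × List String :=
  match fuel with
  | 0 => (n1, n2)
  | f + 1 =>
    if i < n1.length then
      let letter := n1.getD i ""
      if letter ∈ n2 then
        aLoop f (i + 1) (pyReplace n1 "" letter) (pyReplace n2 "" letter)
      else aLoop f (i + 1) n1 n2
    else (n1, n2)

def analyze_names (name1 : String) (name2 : String) : List String :=
  let n1 := name1.toList.map (fun c => String.ofList [c])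
  let n2 := name2.toList.map (fun c => String.ofList [c])
  let st := aLoop n1.length 0 n1 n2
  (st.1 ++ st.2).filter (fun s => decide (s ≠ ""))

-- ===== PORT B =====
def analyze_names_alt (name1 : String) (name2 : String) : List String :=
  let l1 := name1.toList.map (fun c => String.ofList [c])
  let l2 := name2.toList.map (fun c => String.ofList [c])
  let avail0 := l2.foldl (fun d ch => d.insert ch (d.getD ch 0 + 1))
    (PySem.Dict.empty : PySem.Dict String Int)
  let st1 := l1.foldl (fun (st : PySem.Dict String Int × PySem.Dict String Int × List String) ch =>
      if st.1.getD ch 0 > 0 then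
        (st.1.insert ch (st.1.getD ch 0 - 1), st.2.1.insert ch (st.2.1.getD ch 0 + 1), st.2.2)
      else (st.1, st.2.1, st.2.2 ++ [ch]))
    (avail0, (PySem.Dict.empty : PySem.Dict String Int), ([] : List String))
  let st2 := l2.foldl (fun (st : PySem.Dict String Int × List String) ch =>
      if st.1.getD ch 0 > 0 then (st.1.insert ch (st.1.getD ch 0 - 1), st.2)
      else (st.1, st.2 ++ [ch]))
    (st1.2.1, st1.2.2)
  st2.2

-- ===== PRECONDITION & SPEC =====
def Spec_analyze_names (name1 : String) (name2 : String) (out : List String) : Prop := out = analyze_names_alt name1 name2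
instance (name1 : String) (name2 : String) (out : List String) : Decidable (Spec_analyze_names name1 name2 out) := by unfold Spec_analyze_names; infer_instance

-- ===== CLAIM (what is proved, stated in full; the proofs are below) =====
def Claim_equal_analyze_names : Prop := ∀ (name1 : String) (name2 : String), Dom_analyze_names name1 name2 → Spec_analyze_names name1 name2 (analyze_names name1 name2)

-- ===== LEMMAS AND PROOFS =====

-- pointwise update of a count function
def updF (f : String → Int) (k : String) (v : Int) : String → Int :=
  fun x => if x = k then v else f x

-- the meeting point of both proofs: scan l with remaining-removal counts r against available
-- counts cnt; returns name1's letters with removed ones blanked, and the final removal counts.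
def goA (cnt : String → Int) : List String → (String → Int) → List String × (String → Int)
  | [], r => ([], r)
  | c :: t, r =>
    if cnt c - r c > 0 then
      let p := goA cnt t (updF r c (r c + 1))
      ("" :: p.1, p.2)
    else
      let p := goA cnt t r
      (c :: p.1, p.2)

-- l with, for each letter c, the leftmost (r c) occurrences blanked
def mark2 : List String → (String → Int) → List String
  | [], _ => []
  | c :: t, r => if r c > 0 then "" :: mark2 t (updF r c (r c - 1)) else c :: mark2 t r

-- blank the first occurrence of x
def blankFirst : List String → String → List String
  | [], _ => []
  | c :: t, x => if c = x then "" :: t else c :: blankFirst t x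

-- functional shadows of B's two dict folds
def F1 : List String → (String → Int) → (String → Int) → List String → ((String → Int) × (String → Int) × List String)
  | [], a, r, out => (a, r, out)
  | c :: t, a, r, out =>
    if a c > 0 then F1 t (updF a c (a c - 1)) (updF r c (r c + 1)) out
    else F1 t a r (out ++ [c])

def F2 : List String → (String → Int) → List String → ((String → Int) × List String)
  | [], r, out => (r, out)
  | c :: t, r, out => if r c > 0 then F2 t (updF r c (r c - 1)) out else F2 t r (out ++ [c])

theorem mark2_zero (l : List String) : mark2 l (fun _ => 0) = l := by
  induction l with
  | nil => rfl
  | cons c t ih => simp [mark2, ih]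

theorem mem_mark2 (x : String) (hx : x ≠ "") :
    ∀ (l : List String) (r : String → Int), (∀ c, 0 ≤ r c ∧ r c ≤ (l.count c : Int)) →
    (x ∈ mark2 l r ↔ (l.count x : Int) - r x > 0) := by
  intro l
  induction l with
  | nil =>
    intro r h
    have := h x
    simp [mark2] at *
    omega
  | cons c t ih =>
    intro r h
    have hcount : ∀ c', (((c :: t).count c' : Nat) : Int) = (t.count c' : Int) + (if c' = c then 1 else 0) := by
      intro c'
      by_cases hcc : c' = c
      · simp [List.count_cons, hcc]
      · simp [List.count_cons, hcc, Ne.symm hcc]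
    by_cases hc : r c > 0
    · have hb : ∀ c', 0 ≤ updF r c (r c - 1) c' ∧ updF r c (r c - 1) c' ≤ (t.count c' : Int) := by
        intro c'
        have h0 := (h c').1
        have h1 := (h c').2
        rw [hcount c'] at h1
        by_cases hcc : c' = c
        · subst hcc
          simp only [updF] at *
          simp at h1 ⊢
          omega
        · simp only [updF, if_neg hcc]
          simp [hcc] at h1
          exact ⟨h0, by omega⟩
      have hih := ih (updF r c (r c - 1)) hb
      simp only [mark2, if_pos hc, List.mem_cons, hih]
      rw [hcount x]
      by_cases hxc : x = c
      · subst hxc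
        simp [updF, hx]
        try omega
      · simp [updF, hxc, hx]
  -- same decision on both sides
    · have hb : ∀ c', 0 ≤ r c' ∧ r c' ≤ (t.count c' : Int) := by
        intro c'
        have h0 := (h c').1
        have h1 := (h c').2
        rw [hcount c'] at h1
        by_cases hcc : c' = c
        · subst hcc
          simp at h1
          omega
        · simp [hcc] at h1
          exact ⟨h0, h1⟩
      have hih := ih r hb
      simp only [mark2, if_neg hc, List.mem_cons, hih]
      rw [hcount x]
      have hbc := hb c
      by_cases hxc : x = c
      · subst hxc
        simp
        omega
      · simp [hxc]

theorem blankFirst_mark2 (x : String) (hx : x ≠ "") :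
    ∀ (l : List String) (r : String → Int), (∀ c, 0 ≤ r c) →
    blankFirst (mark2 l r) x = mark2 l (updF r x (r x + 1)) := by
  intro l
  induction l with
  | nil => intro r _; rfl
  | cons c t ih =>
    intro r h0
    have h0x := h0 x
    have h0c := h0 c
    by_cases hc : r c > 0
    · have hc' : updF r x (r x + 1) c > 0 := by
        by_cases hcx : c = x <;> simp [updF, hcx] <;> omega
      have h0' : ∀ c', 0 ≤ updF r c (r c - 1) c' := by
        intro c'
        have := h0 c'
        by_cases hcc : c' = c <;> simp [updF, hcc] <;> omega
      have hfun : updF (updF r c (r c - 1)) x (updF r c (r c - 1) x + 1)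
          = updF (updF r x (r x + 1)) c (updF r x (r x + 1) c - 1) := by
        funext c'
        by_cases h1 : c' = x <;> by_cases h2 : c' = c
        · subst h1; subst h2; simp [updF]
        · subst h1; simp [updF, h2, Ne.symm h2]
        · subst h2; simp [updF, h1, Ne.symm h1]
        · simp [updF, h1, h2]
      simp only [mark2, if_pos hc, if_pos hc', blankFirst, if_neg (Ne.symm hx)]
      rw [ih (updF r c (r c - 1)) h0', hfun]
    · by_cases hcx : c = x
      · subst hcx
        have hc' : updF r c (r c + 1) c > 0 := by simp [updF]; omega
        have hfun : updF (updF r c (r c + 1)) c (updF r c (r c + 1) c - 1) = r := by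
          funext c'
          by_cases h1 : c' = c <;> simp [updF, h1]
        simp only [mark2, if_neg hc, if_pos hc', blankFirst]
        simp [hfun]
      · have hc' : ¬ updF r x (r x + 1) c > 0 := by
          simp only [updF, if_neg hcx]
          exact hc
        simp only [mark2, if_neg hc, if_neg hc', blankFirst, if_neg hcx]
        rw [ih r h0]

theorem blankFirst_append (x : String) (suf : List String) :
    ∀ (pre : List String), x ∉ pre → blankFirst (pre ++ x :: suf) x = pre ++ "" :: suf := by
  intro pre
  induction pre with
  | nil => intro _; simp [blankFirst]
  | cons c t ih =>
    intro hnm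
    simp only [List.mem_cons, not_or] at hnm
    simp only [List.cons_append, blankFirst, if_neg (Ne.symm hnm.1)]
    rw [ih hnm.2]

theorem pyReplace_eq_blankFirst (seq : List String) (x : String) (hmem : x ∈ seq) (hx : x ≠ "") :
    pyReplace seq "" x = blankFirst seq x := by
  obtain ⟨k, hk⟩ := Option.isSome_iff_exists.mp ((PySem.List.index?_isSome_iff seq x).mpr hmem)
  obtain ⟨pre, suf, hseq, hlen, hnm⟩ := (PySem.List.index?_eq_some_iff seq x k).mp hk
  subst hseq
  subst hlen
  have hlt : pre.length < (pre ++ x :: suf).length := by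
    simp
  rw [pyReplace]
  simp only [if_pos hx, hk, Option.getD_some]
  rw [PySem.List.pop?_natCast _ _ hlt]
  simp only [Option.map_some, Option.getD_some]
  have he : (pre ++ x :: suf).eraseIdx pre.length = pre ++ suf := by
    rw [List.eraseIdx_append_of_length_le (le_refl _)]
    simp
  rw [he]
  rw [PySem.List.insert_natCast _ _ _ (by simp)]
  rw [List.take_left, List.drop_left]
  rw [blankFirst_append x suf pre hnm]

theorem getD_append_cons (P t : List String) (letter : String) :
    (P ++ letter :: t).getD P.length "" = letter := by
  induction P with
  | nil => rfl
  | cons p ps ih => simpa using ih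

theorem aLoop_eq (l2 : List String) :
    ∀ (suf P : List String) (r : String → Int),
    (∀ c, 0 ≤ r c ∧ r c ≤ (l2.count c : Int)) →
    (∀ c ∈ P, c ≠ "" → (l2.count c : Int) - r c ≤ 0) →
    (∀ c ∈ suf, c ≠ "") →
    aLoop suf.length P.length (P ++ suf) (mark2 l2 r)
      = (P ++ (goA (fun c => (l2.count c : Int)) suf r).1,
         mark2 l2 (goA (fun c => (l2.count c : Int)) suf r).2) := by
  intro suf
  induction suf with
  | nil =>
    intro P r hr hP hsuf
    simp [aLoop, goA]
  | cons letter t ih =>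
    intro P r hr hP hsuf
    have hlx : letter ≠ "" := hsuf letter (by simp)
    have hlt : P.length < (P ++ letter :: t).length := by simp
    have hget : (P ++ letter :: t).getD P.length "" = letter := getD_append_cons P t letter
    have hmem := mem_mark2 letter hlx l2 r hr
    simp only [List.length_cons, aLoop, if_pos hlt, hget]
    by_cases hpos : (l2.count letter : Int) - r letter > 0
    · rw [if_pos (hmem.mpr hpos)]
      have hnotinP : letter ∉ P := fun hin => absurd (hP letter hin hlx) (by omega)
      have h2' : pyReplace (mark2 l2 r) "" letter = mark2 l2 (updF r letter (r letter + 1)) := by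
        rw [pyReplace_eq_blankFirst _ _ (hmem.mpr hpos) hlx,
           blankFirst_mark2 letter hlx l2 r (fun c => (hr c).1)]
      have h1' : pyReplace (P ++ letter :: t) "" letter = (P ++ [""]) ++ t := by
        rw [pyReplace_eq_blankFirst _ _ (by simp) hlx, blankFirst_append letter t P hnotinP]
        simp
      rw [h1', h2']
      have hr' : ∀ c, 0 ≤ updF r letter (r letter + 1) c ∧
          updF r letter (r letter + 1) c ≤ (l2.count c : Int) := by
        intro c
        have h1 := hr c
        have h2 := hr letter
        by_cases hcl : c = letter
        · subst hcl; simp [updF]; omega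
        · simp [updF, hcl]; omega
      have hP' : ∀ c ∈ P ++ [""], c ≠ "" → (l2.count c : Int) - updF r letter (r letter + 1) c ≤ 0 := by
        intro c hc hcne
        simp only [List.mem_append, List.mem_singleton] at hc
        rcases hc with hc | hc
        · by_cases hcl : c = letter
          · subst hcl
            have := hP c hc hcne
            simp [updF]
            omega
          · have := hP c hc hcne
            simp [updF, hcl]
            omega
        · exact absurd hc hcne
      have hsuf' : ∀ c ∈ t, c ≠ "" := fun c hc => hsuf c (by simp [hc])
      have hih := ih (P ++ [""]) (updF r letter (r letter + 1)) hr' hP' hsuf'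
      simp only [List.length_append, List.length_singleton] at hih
      rw [hih]
      simp only [goA, if_pos hpos]
      simp
    · rw [if_neg (fun hm => absurd (hmem.mp hm) hpos)]
      have hP' : ∀ c ∈ P ++ [letter], c ≠ "" → (l2.count c : Int) - r c ≤ 0 := by
        intro c hc hcne
        simp only [List.mem_append, List.mem_singleton] at hc
        rcases hc with hc | hc
        · exact hP c hc hcne
        · subst hc; omega
      have hsuf' : ∀ c ∈ t, c ≠ "" := fun c hc => hsuf c (by simp [hc])
      have hih := ih (P ++ [letter]) r hr hP' hsuf'
      simp only [List.length_append, List.length_singleton] at hih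
      rw [show P ++ letter :: t = (P ++ [letter]) ++ t by simp, hih]
      simp only [goA, if_neg hpos]
      simp

theorem F1_sim (t : List String) :
    ∀ (ad rd : PySem.Dict String Int) (out : List String) (a r : String → Int),
    (∀ x, ad.getD x 0 = a x) → (∀ x, rd.getD x 0 = r x) →
    (∀ x, (t.foldl (fun (st : PySem.Dict String Int × PySem.Dict String Int × List String) ch =>
      if st.1.getD ch 0 > 0 then
        (st.1.insert ch (st.1.getD ch 0 - 1), st.2.1.insert ch (st.2.1.getD ch 0 + 1), st.2.2)
      else (st.1, st.2.1, st.2.2 ++ [ch])) (ad, rd, out)).2.1.getD x 0 = (F1 t a r out).2.1 x) ∧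
    (t.foldl (fun (st : PySem.Dict String Int × PySem.Dict String Int × List String) ch =>
      if st.1.getD ch 0 > 0 then
        (st.1.insert ch (st.1.getD ch 0 - 1), st.2.1.insert ch (st.2.1.getD ch 0 + 1), st.2.2)
      else (st.1, st.2.1, st.2.2 ++ [ch])) (ad, rd, out)).2.2 = (F1 t a r out).2.2 := by
  induction t with
  | nil =>
    intro ad rd out a r ha hrd
    exact ⟨fun x => hrd x, rfl⟩
  | cons c t ih =>
    intro ad rd out a r ha hrd
    simp only [List.foldl_cons, F1]
    by_cases hc : a c > 0
    · rw [if_pos (by rw [ha c]; exact hc), if_pos hc]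
      exact ih (ad.insert c (ad.getD c 0 - 1)) (rd.insert c (rd.getD c 0 + 1)) out
        (updF a c (a c - 1)) (updF r c (r c + 1))
        (by
          intro x
          rw [PySem.Dict.getD_insert, ha c]
          by_cases hxc : x = c <;> simp [updF, hxc, ha x])
        (by
          intro x
          rw [PySem.Dict.getD_insert, hrd c]
          by_cases hxc : x = c <;> simp [updF, hxc, hrd x])
    · rw [if_neg (by rw [ha c]; exact hc), if_neg hc]
      exact ih ad rd (out ++ [c]) a r ha hrd

theorem F2_sim (t : List String) :
    ∀ (rd : PySem.Dict String Int) (out : List String) (r : String → Int),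
    (∀ x, rd.getD x 0 = r x) →
    (t.foldl (fun (st : PySem.Dict String Int × List String) ch =>
      if st.1.getD ch 0 > 0 then (st.1.insert ch (st.1.getD ch 0 - 1), st.2)
      else (st.1, st.2 ++ [ch])) (rd, out)).2 = (F2 t r out).2 := by
  induction t with
  | nil => intro rd out r _; rfl
  | cons c t ih =>
    intro rd out r hrd
    simp only [List.foldl_cons, F2]
    by_cases hc : r c > 0
    · rw [if_pos (by rw [hrd c]; exact hc), if_pos hc]
      exact ih (rd.insert c (rd.getD c 0 - 1)) out (updF r c (r c - 1))
        (by
          intro x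
          rw [PySem.Dict.getD_insert, hrd c]
          by_cases hxc : x = c <;> simp [updF, hxc, hrd x])
    · rw [if_neg (by rw [hrd c]; exact hc), if_neg hc]
      exact ih rd (out ++ [c]) r hrd

theorem F1_goA (cnt : String → Int) :
    ∀ (t : List String) (r a : String → Int) (out : List String),
    (∀ c, a c = cnt c - r c) → (∀ c ∈ t, c ≠ "") →
    (F1 t a r out).2.1 = (goA cnt t r).2 ∧
    (F1 t a r out).2.2 = out ++ (goA cnt t r).1.filter (fun s => decide (s ≠ "")) := by
  intro t
  induction t with
  | nil => intro r a out _ _; exact ⟨rfl, by simp [F1, goA]⟩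
  | cons c t ih =>
    intro r a out ha hne
    have hcne : c ≠ "" := hne c (by simp)
    have hne' : ∀ c' ∈ t, c' ≠ "" := fun c' hc' => hne c' (by simp [hc'])
    by_cases hc : cnt c - r c > 0
    · have ha' : ∀ c', updF a c (a c - 1) c' = cnt c' - updF r c (r c + 1) c' := by
        intro c'
        by_cases hcc : c' = c <;> simp [updF, hcc, ha c', ha c] <;> omega
      have hih := ih (updF r c (r c + 1)) (updF a c (a c - 1)) out ha' hne'
      simp only [F1, goA, if_pos hc, if_pos (show a c > 0 by rw [ha c]; exact hc)]
      refine ⟨hih.1, ?_⟩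
      rw [hih.2]
      simp
    · have hih := ih r a (out ++ [c]) ha hne'
      simp only [F1, goA, if_neg hc, if_neg (show ¬ a c > 0 by rw [ha c]; exact hc)]
      refine ⟨hih.1, ?_⟩
      rw [hih.2]
      simp [hcne]

theorem F2_mark2 :
    ∀ (l : List String) (r : String → Int) (out : List String), (∀ c ∈ l, c ≠ "") →
    (F2 l r out).2 = out ++ (mark2 l r).filter (fun s => decide (s ≠ "")) := by
  intro l
  induction l with
  | nil => intro r out _; simp [F2, mark2]
  | cons c t ih =>
    intro r out hne
    have hcne : c ≠ "" := hne c (by simp)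
    have hne' : ∀ c' ∈ t, c' ≠ "" := fun c' hc' => hne c' (by simp [hc'])
    by_cases hc : r c > 0
    · simp only [F2, mark2, if_pos hc]
      rw [ih (updF r c (r c - 1)) out hne']
      simp
    · simp only [F2, mark2, if_neg hc]
      rw [ih r (out ++ [c]) hne']
      simp [hcne]

theorem ne_empty_of_mem_map (cs : List Char) :
    ∀ s ∈ cs.map (fun c => String.ofList [c]), s ≠ "" := by
  intro s hs
  simp only [List.mem_map] at hs
  obtain ⟨c, _, rfl⟩ := hs
  intro h
  have := congrArg String.toList h
  simp at this

-- both ports computed in the common normal form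
theorem portA_eq (name1 name2 : String) :
    analyze_names name1 name2 =
      ((goA (fun c => ((name2.toList.map (fun c => String.ofList [c])).count c : Int))
          (name1.toList.map (fun c => String.ofList [c])) (fun _ => 0)).1).filter (fun s => decide (s ≠ "")) ++
      (mark2 (name2.toList.map (fun c => String.ofList [c]))
          (goA (fun c => ((name2.toList.map (fun c => String.ofList [c])).count c : Int))
            (name1.toList.map (fun c => String.ofList [c])) (fun _ => 0)).2).filter (fun s => decide (s ≠ "")) := by
  have h1ne := ne_empty_of_mem_map name1.toList
  have hA := aLoop_eq (name2.toList.map (fun c => String.ofList [c]))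
      (name1.toList.map (fun c => String.ofList [c])) [] (fun _ => 0)
      (fun c => ⟨le_refl 0, by positivity⟩) (by simp) h1ne
  simp only [List.nil_append, List.length_nil, mark2_zero] at hA
  simp only [analyze_names, hA]
  simp [List.filter_append]

theorem portB_eq (name1 name2 : String) :
    analyze_names_alt name1 name2 =
      ((goA (fun c => ((name2.toList.map (fun c => String.ofList [c])).count c : Int))
          (name1.toList.map (fun c => String.ofList [c])) (fun _ => 0)).1).filter (fun s => decide (s ≠ "")) ++
      (mark2 (name2.toList.map (fun c => String.ofList [c]))
          (goA (fun c => ((name2.toList.map (fun c => String.ofList [c])).count c : Int))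
            (name1.toList.map (fun c => String.ofList [c])) (fun _ => 0)).2).filter (fun s => decide (s ≠ "")) := by
  have h1ne := ne_empty_of_mem_map name1.toList
  have h2ne := ne_empty_of_mem_map name2.toList
  have havail : ∀ x, ((name2.toList.map (fun c => String.ofList [c])).foldl
      (fun d ch => d.insert ch (d.getD ch 0 + 1))
      (PySem.Dict.empty : PySem.Dict String Int)).getD x 0
      = (fun c => (((name2.toList.map (fun c => String.ofList [c])).count c : Nat) : Int)) x := by
    intro x
    rw [PySem.Dict.getD_foldl_insert_add_one]
    simp
  have hsim1 := F1_sim (name1.toList.map (fun c => String.ofList [c])) _ PySem.Dict.empty []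
      (fun c => (((name2.toList.map (fun c => String.ofList [c])).count c : Nat) : Int)) (fun _ => 0)
      havail (fun x => by simp)
  have hgoa := F1_goA (fun c => (((name2.toList.map (fun c => String.ofList [c])).count c : Nat) : Int))
      (name1.toList.map (fun c => String.ofList [c])) (fun _ => 0)
      (fun c => (((name2.toList.map (fun c => String.ofList [c])).count c : Nat) : Int)) []
      (fun c => by simp) h1ne
  simp only [analyze_names_alt]
  rw [F2_sim _ _ _ _ hsim1.1, hsim1.2, hgoa.1, hgoa.2,
      F2_mark2 _ _ _ h2ne]
  simp

-- ===== VERDICT (by name: the statement is the Claim_ definition above) =====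
theorem analyze_names_spec : Claim_equal_analyze_names := by
  unfold Claim_equal_analyze_names Spec_analyze_names
  intro name1 name2 _
  rw [portA_eq, portB_eq]
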